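-- pv_equiv track=rewrite | github.com/Franco414/DASO_C14 | Ejercicios_Extras/Unidad6/Ejercicio_6_3.py | my_function_string_d
-- ===== SOURCE A (Python) =====
-- def my_function_string_d(caracter,cadena,maxRe):
--     lista=[]
--     count=0
--     i=0
--     countRemp=0
--     while(i<len(cadena)):
--         if(count==3):
--             if(countRemp<maxRe):
--                 lista.append(caracter)
--                 count=0
--                 countRemp=countRemp+1
--             else:
--                 lista.append(cadena[i])
--                 i=i+1
--         else:
--             lista.append(cadena[i])
--             i=i+1
--             count=count+1
--     ret="".join(lista)
--     return ret
-- ===== SOURCE B (Python) =====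
-- def my_function_string_d(caracter, cadena, maxRe):
--     parts = []
--     while len(cadena) > 3 and maxRe > 0:
--         parts.append(cadena[:3])
--         parts.append(caracter)
--         cadena = cadena[3:]
--         maxRe -= 1
--     parts.append(cadena)
--     return "".join(parts)
-- ===== Notes on version B (the rewrite author's own statement) =====
-- stated objective: simpler
-- what changed: Replaces A's character-by-character state machine (count/i/countRemp bookkeeping over indices) with a loop that peels whole 3-character chunks off the front of the string with slicing, appending a separator per chunk while insertions remain, then appends the rest verbatim.
import Mathlib
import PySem

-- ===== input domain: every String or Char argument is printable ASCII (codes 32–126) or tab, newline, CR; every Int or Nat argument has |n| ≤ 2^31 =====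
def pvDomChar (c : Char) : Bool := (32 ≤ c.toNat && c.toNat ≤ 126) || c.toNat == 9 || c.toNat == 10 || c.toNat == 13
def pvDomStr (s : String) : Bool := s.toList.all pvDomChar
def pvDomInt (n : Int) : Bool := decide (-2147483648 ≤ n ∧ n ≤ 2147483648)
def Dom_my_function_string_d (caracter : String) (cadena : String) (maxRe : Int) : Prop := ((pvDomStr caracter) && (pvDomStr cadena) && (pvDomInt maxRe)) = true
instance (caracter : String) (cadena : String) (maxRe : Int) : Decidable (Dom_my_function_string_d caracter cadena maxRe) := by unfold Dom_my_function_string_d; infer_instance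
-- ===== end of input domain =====

-- B replaces A's character-by-character state machine (count/i/countRemp bookkeeping) with a
-- loop peeling whole 3-character chunks off the front by slicing; objective: simpler.

-- ===== PORT A =====
-- A's while loop: state (lista, count, i, countRemp); lista holds the appended pieces
-- (strings in Python, char lists here), joined with "" at the end.
def loopA (car : List Char) (cs : List Char) (maxRe : Int)
    (lista : List (List Char)) (count : Nat) (i : Nat) (countRemp : Int) : List (List Char) :=
  if h : i < cs.length then
    if count = 3 then
      if countRemp < maxRe then
        loopA car cs maxRe (lista ++ [car]) 0 i (countRemp + 1)
      else
        loopA car cs maxRe (lista ++ [[cs[i]]]) count (i + 1) countRemp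
    else
      loopA car cs maxRe (lista ++ [[cs[i]]]) (count + 1) (i + 1) countRemp
  else lista
termination_by 2 * (cs.length - i) + (if count = 3 then 1 else 0)
decreasing_by all_goals (split_ifs <;> (try contradiction) <;> omega)

def my_function_string_d (caracter : String) (cadena : String) (maxRe : Int) : String :=
  String.ofList ((loopA caracter.toList cadena.toList maxRe [] 0 0 0).flatten)

-- ===== PORT B =====
-- B's while loop: peel cadena[:3] + caracter while len(cadena) > 3 and maxRe > 0
-- (cadena[:3] / cadena[3:] with literal nonnegative bounds are exactly take 3 / drop 3),
-- then append the remaining cadena and join.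
def loopB (car : List Char) (parts : List (List Char)) (cs : List Char) (maxRe : Int) : List (List Char) :=
  if 3 < cs.length ∧ 0 < maxRe then
    loopB car (parts ++ [cs.take 3, car]) (cs.drop 3) (maxRe - 1)
  else parts ++ [cs]
termination_by cs.length
decreasing_by simp_all; omega

def my_function_string_d_alt (caracter : String) (cadena : String) (maxRe : Int) : String :=
  String.ofList ((loopB caracter.toList [] cadena.toList maxRe).flatten)

-- ===== PRECONDITION & SPEC =====
def Spec_my_function_string_d (caracter : String) (cadena : String) (maxRe : Int) (out : String) : Prop := out = my_function_string_d_alt caracter cadena maxRe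
instance (caracter : String) (cadena : String) (maxRe : Int) (out : String) : Decidable (Spec_my_function_string_d caracter cadena maxRe out) := by unfold Spec_my_function_string_d; infer_instance

-- ===== CLAIM (what is proved, stated in full; the proofs are below) =====
def Claim_equal_my_function_string_d : Prop := ∀ (caracter : String) (cadena : String) (maxRe : Int), Dom_my_function_string_d caracter cadena maxRe → Spec_my_function_string_d caracter cadena maxRe (my_function_string_d caracter cadena maxRe)

-- ===== LEMMAS AND PROOFS =====

-- Common reference function: copy characters keeping A's group counter; at count = 3 with
-- budget left emit the separator and restart the group, else copy the rest verbatim.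
def gRef (car : List Char) : List Char → Nat → Int → List Char
  | [], _, _ => []
  | c :: cs, count, rem =>
    if count = 3 then
      if 0 < rem then car ++ c :: gRef car cs 1 (rem - 1)
      else c :: cs
    else c :: gRef car cs (count + 1) rem

theorem gRef_nonpos (car : List Char) : ∀ (cs : List Char) (count : Nat) (rem : Int),
    rem ≤ 0 → gRef car cs count rem = cs := by
  intro cs
  induction cs with
  | nil => intro _ _ _; rfl
  | cons c cs ih =>
    intro count rem h
    by_cases hc : count = 3 <;> simp [gRef, hc, ih _ _ h] <;> omega

theorem loopA_eq (car : List Char) (cs : List Char) (maxRe : Int) :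
    ∀ (lista : List (List Char)) (count : Nat) (i : Nat) (countRemp : Int),
    (loopA car cs maxRe lista count i countRemp).flatten
      = lista.flatten ++ gRef car (cs.drop i) count (maxRe - countRemp) := by
  intro lista count i countRemp
  induction lista, count, i, countRemp using loopA.induct car cs maxRe with
  | case1 lista i countRemp h hr ih =>
    rw [loopA, dif_pos h, if_pos (show (3:Nat) = 3 from rfl), if_pos hr, ih,
      List.drop_eq_getElem_cons h]
    have hrem : (0:Int) < maxRe - countRemp := by omega
    have e : maxRe - (countRemp + 1) = maxRe - countRemp - 1 := by omega
    simp [gRef, e]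
    exact fun hco => absurd hrem (by omega)
  | case2 lista i countRemp h hr ih =>
    rw [loopA, dif_pos h, if_pos (show (3:Nat) = 3 from rfl), if_neg hr, ih]
    have hrem : maxRe - countRemp ≤ 0 := by omega
    rw [gRef_nonpos car _ _ _ hrem, gRef_nonpos car _ _ _ hrem,
      List.drop_eq_getElem_cons h]
    simp
  | case3 lista count i countRemp h hc ih =>
    rw [loopA, dif_pos h, if_neg hc, ih, List.drop_eq_getElem_cons h]
    simp [gRef, hc]
  | case4 lista count i countRemp h =>
    rw [loopA, dif_neg h, List.drop_eq_nil_of_le (by omega)]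
    simp [gRef]

theorem gRef_small (car : List Char) (cs : List Char) (rem : Int) (h : cs.length ≤ 3) :
    gRef car cs 0 rem = cs := by
  match cs with
  | [] => rfl
  | [a] => simp [gRef]
  | [a, b] => simp [gRef]
  | [a, b, c] => simp [gRef]
  | a :: b :: c :: d :: rest => exfalso; simp at h; omega

theorem loopB_eq (car : List Char) : ∀ (n : Nat) (cs : List Char), cs.length ≤ n →
    ∀ (parts : List (List Char)) (rem : Int),
    (loopB car parts cs rem).flatten = parts.flatten ++ gRef car cs 0 rem := by
  intro n
  induction n with
  | zero =>
    intro cs hn parts rem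
    have : cs = [] := List.eq_nil_of_length_eq_zero (by omega)
    subst this
    rw [loopB]; simp [gRef]
  | succ n ih =>
    intro cs hn parts rem
    by_cases hcond : 3 < cs.length ∧ 0 < rem
    · match cs, hn, hcond with
      | a :: b :: c :: d :: rest, hn, hcond =>
        rw [loopB, if_pos hcond,
          show List.drop 3 (a :: b :: c :: d :: rest) = d :: rest from rfl,
          show List.take 3 (a :: b :: c :: d :: rest) = [a, b, c] from rfl]
        have hlen : (d :: rest).length ≤ n := by simp at hn ⊢; omega
        rw [ih _ hlen]
        simp [gRef, hcond.2]
    · rw [loopB, if_neg hcond]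
      rw [not_and_or, not_lt, not_lt] at hcond
      by_cases hlen : cs.length ≤ 3
      · rw [gRef_small car cs rem hlen]; simp
      · rw [gRef_nonpos car cs 0 rem (by omega)]; simp

-- ===== VERDICT (by name: the statement is the Claim_ definition above) =====
theorem my_function_string_d_spec : Claim_equal_my_function_string_d := by
  intro caracter cadena maxRe _
  unfold Spec_my_function_string_d my_function_string_d my_function_string_d_alt
  rw [loopA_eq, loopB_eq caracter.toList cadena.toList.length cadena.toList (le_refl _)]
  simp
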